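-- pv_equiv track=rewrite | github.com/ryankalfus/OEIS-A068638 | scripts/compute_a068638.py | sample_witnesses
-- ===== SOURCE A (Python) =====
-- def sample_witnesses(mask: int, cap: int = 8) -> list[int]:
--     values: list[int] = []
--     while mask and len(values) < cap:
--         low_bit = mask & -mask
--         index = low_bit.bit_length() - 1
--         values.append(2 * index)
--         mask ^= low_bit
--     return values
-- ===== SOURCE B (Python) =====
-- def sample_witnesses(mask: int, cap: int = 8) -> list[int]:
--     values: list[int] = []
--     index = 0
--     while mask and len(values) < cap:
--         if mask & 1:
--             values.append(2 * index)
--         mask >>= 1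
--         index += 1
--     return values
-- ===== Notes on version B (the rewrite author's own statement) =====
-- stated objective: idiomatic
-- what changed: B walks every bit position with a running index counter and a shift-by-one loop instead of A's jump-to-lowest-set-bit idiom (mask & -mask, bit_length, xor-clear).
import Mathlib
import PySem

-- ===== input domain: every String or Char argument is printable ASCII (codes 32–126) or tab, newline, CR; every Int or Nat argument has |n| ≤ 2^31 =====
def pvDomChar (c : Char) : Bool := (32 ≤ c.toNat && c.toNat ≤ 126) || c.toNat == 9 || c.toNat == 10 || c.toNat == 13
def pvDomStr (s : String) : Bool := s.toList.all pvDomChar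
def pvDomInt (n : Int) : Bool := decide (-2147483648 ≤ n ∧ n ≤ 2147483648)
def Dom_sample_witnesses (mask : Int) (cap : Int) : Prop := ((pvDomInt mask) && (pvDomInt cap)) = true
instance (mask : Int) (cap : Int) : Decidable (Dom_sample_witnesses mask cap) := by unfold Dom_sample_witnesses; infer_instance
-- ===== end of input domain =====

-- B walks every bit position with a shift-by-one loop and an index counter instead of A's
-- jump-to-lowest-set-bit idiom (mask & -mask / bit_length / xor); same return value, alternative structure.


-- lemmas the ports need for termination (cited by the decreasing_by blocks)
lemma pvOfNatCast (n : Nat) : Int.ofNat n = (n : Int) := rfl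

lemma natAbs_shiftRight_le (m : Int) : (m >>> (1:Nat)).natAbs ≤ m.natAbs := by
  cases m with
  | ofNat n =>
    have e : (Int.ofNat n) >>> (1:Nat) = Int.ofNat (n >>> 1) := rfl
    rw [e, Nat.shiftRight_one]
    simp only [pvOfNatCast]
    omega
  | negSucc n =>
    have e : (Int.negSucc n) >>> (1:Nat) = Int.negSucc (n >>> 1) := rfl
    rw [e, Nat.shiftRight_one]
    simp only [Int.negSucc_eq]
    omega

lemma natAbs_shiftRight_lt (m : Int) (h0 : m ≠ 0) (he : m % 2 = 0) :
    (m >>> (1:Nat)).natAbs < m.natAbs := by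
  cases m with
  | ofNat n =>
    have e : (Int.ofNat n) >>> (1:Nat) = Int.ofNat (n >>> 1) := rfl
    rw [e, Nat.shiftRight_one]
    simp only [pvOfNatCast] at h0 ⊢
    omega
  | negSucc n =>
    have e : (Int.negSucc n) >>> (1:Nat) = Int.negSucc (n >>> 1) := rfl
    rw [e, Nat.shiftRight_one]
    simp only [Int.negSucc_eq] at he ⊢
    omega

lemma band_one_eq_emod (m : Int) : PySem.Int.band m 1 = m % 2 := by
  rw [PySem.Int.band_one, PySem.Int.mod_eq_emod_of_pos (by norm_num)]

-- ===== PORT A =====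
-- A's while loop: jump to the lowest set bit (mask & -mask), record 2*(bit_length-1), clear it with xor.
def sampleLoopA (mask : Int) (cap : Int) (values : List Int) : List Int :=
  if h : mask ≠ 0 ∧ (values.length : Int) < cap then
    let low := PySem.Int.band mask (-mask)
    let index : Int := (PySem.Int.bitLength low : Int) - 1
    sampleLoopA (PySem.Int.bxor mask low) cap (values ++ [2 * index])
  else values
termination_by (cap - values.length).toNat
decreasing_by simp only [List.length_append, List.length_cons, List.length_nil]; omega

def sample_witnesses (mask : Int) (cap : Int) : List Int := sampleLoopA mask cap []

-- ===== PORT B =====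
-- B's while loop: test the current low bit (mask & 1), append 2*index if set, shift mask right, bump index.
def sampleLoopB (mask : Int) (cap : Int) (index : Int) (values : List Int) : List Int :=
  if h : mask ≠ 0 ∧ (values.length : Int) < cap then
    let values' := if PySem.Int.band mask 1 ≠ 0 then values ++ [2 * index] else values
    sampleLoopB (mask >>> (1:Nat)) cap (index + 1) values'
  else values
termination_by mask.natAbs + (cap - values.length).toNat
decreasing_by
  have hle := natAbs_shiftRight_le mask
  split
  · simp only [List.length_append, List.length_cons, List.length_nil]
    omega
  · next hb =>
    have he : mask % 2 = 0 := by
      have hb1 := band_one_eq_emod mask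
      have h2 := Int.emod_two_eq mask
      simp only [ne_eq, not_not] at hb
      omega
    have := natAbs_shiftRight_lt mask h.1 he
    omega

def sample_witnesses_alt (mask : Int) (cap : Int) : List Int := sampleLoopB mask cap 0 []

-- ===== PRECONDITION & SPEC =====
def Spec_sample_witnesses (mask : Int) (cap : Int) (out : List Int) : Prop := out = sample_witnesses_alt mask cap
instance (mask : Int) (cap : Int) (out : List Int) : Decidable (Spec_sample_witnesses mask cap out) := by unfold Spec_sample_witnesses; infer_instance

-- ===== CLAIM (what is proved, stated in full; the proofs are below) =====
def Claim_equal_sample_witnesses : Prop := ∀ (mask : Int) (cap : Int), Dom_sample_witnesses mask cap → Spec_sample_witnesses mask cap (sample_witnesses mask cap)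

-- ===== LEMMAS AND PROOFS =====

-- Nat bit lemmas (facts about one doubling step of the binary representation)
lemma nat_land_self (k : Nat) : k &&& k = k := by
  apply Nat.eq_of_testBit_eq; intro i
  simp [Nat.testBit_land]

lemma xor_two_mul (a b : Nat) : (2*a) ^^^ (2*b) = 2*(a ^^^ b) := by
  apply Nat.eq_of_testBit_eq; intro i
  cases i with
  | zero =>
    rw [Nat.testBit_xor]
    simp only [Nat.testBit_zero]
    have h1 : (2*a) % 2 = 0 := by omega
    have h2 : (2*b) % 2 = 0 := by omega
    have h3 : (2*(a^^^b)) % 2 = 0 := by omega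
    rw [h1, h2, h3]
    rfl
  | succ i =>
    rw [Nat.testBit_xor]
    simp only [Nat.testBit_succ]
    have h1 : (2*a) / 2 = a := by omega
    have h2 : (2*b) / 2 = b := by omega
    have h3 : (2*(a^^^b)) / 2 = a ^^^ b := by omega
    rw [h1, h2, h3, Nat.testBit_xor]

lemma xor_two_mul_add_one (a b : Nat) : (2*a+1) ^^^ (2*b) = 2*(a ^^^ b) + 1 := by
  apply Nat.eq_of_testBit_eq; intro i
  cases i with
  | zero =>
    rw [Nat.testBit_xor]
    simp only [Nat.testBit_zero]
    have h1 : (2*a+1) % 2 = 1 := by omega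
    have h2 : (2*b) % 2 = 0 := by omega
    have h3 : (2*(a^^^b)+1) % 2 = 1 := by omega
    rw [h1, h2, h3]
    rfl
  | succ i =>
    rw [Nat.testBit_xor]
    simp only [Nat.testBit_succ]
    have h1 : (2*a+1) / 2 = a := by omega
    have h2 : (2*b) / 2 = b := by omega
    have h3 : (2*(a^^^b)+1) / 2 = a ^^^ b := by omega
    rw [h1, h2, h3, Nat.testBit_xor]

lemma xor_two_mul_add_one_both (a b : Nat) : (2*a+1) ^^^ (2*b+1) = 2*(a ^^^ b) := by
  apply Nat.eq_of_testBit_eq; intro i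
  cases i with
  | zero =>
    rw [Nat.testBit_xor]
    simp only [Nat.testBit_zero]
    have h1 : (2*a+1) % 2 = 1 := by omega
    have h2 : (2*b+1) % 2 = 1 := by omega
    have h3 : (2*(a^^^b)) % 2 = 0 := by omega
    rw [h1, h2, h3]
    rfl
  | succ i =>
    rw [Nat.testBit_xor]
    simp only [Nat.testBit_succ]
    have h1 : (2*a+1) / 2 = a := by omega
    have h2 : (2*b+1) / 2 = b := by omega
    have h3 : (2*(a^^^b)) / 2 = a ^^^ b := by omega
    rw [h1, h2, h3, Nat.testBit_xor]

lemma xor_one_even (q : Nat) : (2*q) ^^^ 1 = 2*q+1 := by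
  have h := xor_two_mul_add_one 0 q
  rw [Nat.xor_comm] at h
  simpa using h

lemma xor_one_odd (q : Nat) : (2*q+1) ^^^ 1 = 2*q := by
  have h := xor_two_mul_add_one_both q 0
  simpa using h

lemma land_two_mul_add_one (a b : Nat) : (2*a+1) &&& (2*b) = 2*(a &&& b) := by
  apply Nat.eq_of_testBit_eq; intro i
  cases i with
  | zero =>
    rw [Nat.testBit_land]
    simp only [Nat.testBit_zero]
    have h2 : (2*b) % 2 = 0 := by omega
    have h3 : (2*(a&&&b)) % 2 = 0 := by omega
    rw [h2, h3]
    simp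
  | succ i =>
    rw [Nat.testBit_land]
    simp only [Nat.testBit_succ]
    have h1 : (2*a+1) / 2 = a := by omega
    have h2 : (2*b) / 2 = b := by omega
    have h3 : (2*(a&&&b)) / 2 = a &&& b := by omega
    rw [h1, h2, h3, Nat.testBit_land]

-- p - (p &&& (p-1)) is p's lowest set bit
lemma lowbit_odd (p : Nat) (h : p % 2 = 1) : p &&& (p-1) = p - 1 := by
  obtain ⟨k, rfl⟩ : ∃ k, p = 2*k+1 := ⟨p/2, by omega⟩
  have e : (2*k+1) - 1 = 2*k := by omega
  rw [e, land_two_mul_add_one, nat_land_self]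

lemma lowbit_double (p : Nat) :
    2*p - (2*p &&& (2*p-1)) = 2*(p - (p &&& (p-1))) := by
  rcases Nat.eq_zero_or_pos p with h | h
  · subst h; simp
  · obtain ⟨q, hq⟩ : ∃ q, p = q + 1 := ⟨p - 1, by omega⟩
    have h1 : 2*p - 1 = 2*q+1 := by omega
    have h2 : p - 1 = q := by omega
    rw [h1, h2]
    have h4 : (2*p) &&& (2*q+1) = 2*(p &&& q) := by
      rw [Nat.land_comm, land_two_mul_add_one q p, Nat.land_comm]
    rw [h4]
    have hle1 : p &&& q ≤ q := Nat.and_le_right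
    omega

-- characterisation of Python's mask & -mask on Int
lemma band_neg_self (m : Int) (hm : m ≠ 0) :
    PySem.Int.band m (-m) = ((m.natAbs - (m.natAbs &&& (m.natAbs - 1)) : Nat) : Int) := by
  rcases lt_trichotomy m 0 with h | h | h
  · have h1 : ¬ (0 ≤ m) := by omega
    have h2 : (0:Int) ≤ -m := by omega
    simp only [PySem.Int.band, h1, h2, if_true, if_false]
    have e1 : (-m).toNat = m.natAbs := by omega
    have e2 : (-m - 1).toNat = m.natAbs - 1 := by omega
    rw [e1, e2]
  · exact absurd h hm
  · have h1 : (0:Int) ≤ m := by omega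
    have h2 : ¬ ((0:Int) ≤ -m) := by omega
    simp only [PySem.Int.band, h1, h2, if_true, if_false]
    have e1 : m.toNat = m.natAbs := by omega
    have e2 : (-(-m) - 1).toNat = m.natAbs - 1 := by omega
    rw [e1, e2]

lemma band_neg_self_odd (m : Int) (h : m % 2 = 1) : PySem.Int.band m (-m) = 1 := by
  have hm : m ≠ 0 := by omega
  rw [band_neg_self m hm]
  have hp : m.natAbs % 2 = 1 := by omega
  rw [lowbit_odd _ hp]
  have : 1 ≤ m.natAbs := by omega
  omega

lemma band_neg_self_pos (m : Int) (hm : m ≠ 0) : 0 < PySem.Int.band m (-m) := by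
  rw [band_neg_self m hm]
  have h1 : m.natAbs &&& (m.natAbs - 1) ≤ m.natAbs - 1 := Nat.and_le_right
  have h2 : 1 ≤ m.natAbs := by omega
  omega

lemma band_neg_self_double (m : Int) (hm : m ≠ 0) :
    PySem.Int.band (2*m) (-(2*m)) = 2 * PySem.Int.band m (-m) := by
  have hm2 : (2:Int)*m ≠ 0 := by omega
  rw [band_neg_self m hm, band_neg_self _ hm2]
  have e : (2*m).natAbs = 2 * m.natAbs := by
    rw [Int.natAbs_mul]
    norm_num
  rw [e, lowbit_double, Nat.cast_mul]
  norm_num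

-- Python's m ^ 1 for odd m clears the low bit
lemma bxor_one_odd (m : Int) (h : m % 2 = 1) : PySem.Int.bxor m 1 = m - 1 := by
  have hb : (0:Int) ≤ 1 := by norm_num
  rcases lt_trichotomy m 0 with hm | hm | hm
  · have h1 : ¬ ((0:Int) ≤ m) := by omega
    simp only [PySem.Int.bxor, h1, hb, if_true, if_false]
    obtain ⟨q, hq⟩ : ∃ q : Nat, (-m - 1).toNat = 2*q := ⟨(-m-1).toNat / 2, by omega⟩
    have e1 : ((1:Int)).toNat = 1 := rfl
    rw [e1, hq, xor_one_even]
    omega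
  · omega
  · have h1 : (0:Int) ≤ m := by omega
    simp only [PySem.Int.bxor, h1, hb, if_true]
    obtain ⟨q, hq⟩ : ∃ q : Nat, m.toNat = 2*q+1 := ⟨m.toNat / 2, by omega⟩
    have e1 : ((1:Int)).toNat = 1 := rfl
    rw [e1, hq, xor_one_odd]
    omega

-- Python's (2a) ^ (2b) = 2 (a ^ b) on Int
lemma bxor_double (a b : Int) : PySem.Int.bxor (2*a) (2*b) = 2 * PySem.Int.bxor a b := by
  by_cases ha : (0:Int) ≤ a <;> by_cases hb : (0:Int) ≤ b
  · have ha2 : (0:Int) ≤ 2*a := by omega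
    have hb2 : (0:Int) ≤ 2*b := by omega
    simp only [PySem.Int.bxor, ha, hb, ha2, hb2, if_true]
    have e1 : (2*a).toNat = 2*a.toNat := by omega
    have e2 : (2*b).toNat = 2*b.toNat := by omega
    rw [e1, e2, xor_two_mul, Nat.cast_mul]
    norm_num
  · have ha2 : (0:Int) ≤ 2*a := by omega
    have hb2 : ¬ ((0:Int) ≤ 2*b) := by omega
    simp only [PySem.Int.bxor, ha, hb, ha2, hb2, if_true, if_false]
    have e1 : (2*a).toNat = 2*a.toNat := by omega
    have e2 : (-(2*b) - 1).toNat = 2*(-b-1).toNat + 1 := by omega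
    rw [e1, e2]
    have hc : (2*a.toNat) ^^^ (2*(-b-1).toNat + 1) = (2*(-b-1).toNat+1) ^^^ (2*a.toNat) := Nat.xor_comm _ _
    rw [hc, xor_two_mul_add_one]
    have hc2 : (-b-1).toNat ^^^ a.toNat = a.toNat ^^^ (-b-1).toNat := Nat.xor_comm _ _
    rw [hc2]
    push_cast
    ring
  · have ha2 : ¬ ((0:Int) ≤ 2*a) := by omega
    have hb2 : (0:Int) ≤ 2*b := by omega
    simp only [PySem.Int.bxor, ha, hb, ha2, hb2, if_true, if_false]
    have e1 : (-(2*a) - 1).toNat = 2*(-a-1).toNat + 1 := by omega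
    have e2 : (2*b).toNat = 2*b.toNat := by omega
    rw [e1, e2, xor_two_mul_add_one]
    push_cast
    ring
  · have ha2 : ¬ ((0:Int) ≤ 2*a) := by omega
    have hb2 : ¬ ((0:Int) ≤ 2*b) := by omega
    simp only [PySem.Int.bxor, ha, hb, ha2, hb2, if_false]
    have e1 : (-(2*a) - 1).toNat = 2*(-a-1).toNat + 1 := by omega
    have e2 : (-(2*b) - 1).toNat = 2*(-b-1).toNat + 1 := by omega
    rw [e1, e2, xor_two_mul_add_one_both]
    push_cast
    ring

-- Python's arithmetic right shift by one halves (floor), also on negatives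
lemma two_mul_shiftRight_even (m : Int) (h : m % 2 = 0) : 2 * (m >>> (1:Nat)) = m := by
  cases m with
  | ofNat n =>
    have e : (Int.ofNat n) >>> (1:Nat) = Int.ofNat (n >>> 1) := rfl
    rw [e, Nat.shiftRight_one]
    simp only [pvOfNatCast] at h ⊢
    omega
  | negSucc n =>
    have e : (Int.negSucc n) >>> (1:Nat) = Int.negSucc (n >>> 1) := rfl
    rw [e, Nat.shiftRight_one]
    simp only [Int.negSucc_eq] at h ⊢
    omega

lemma two_mul_shiftRight_odd (m : Int) (h : m % 2 = 1) : 2 * (m >>> (1:Nat)) = m - 1 := by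
  cases m with
  | ofNat n =>
    have e : (Int.ofNat n) >>> (1:Nat) = Int.ofNat (n >>> 1) := rfl
    rw [e, Nat.shiftRight_one]
    simp only [pvOfNatCast] at h ⊢
    omega
  | negSucc n =>
    have e : (Int.negSucc n) >>> (1:Nat) = Int.negSucc (n >>> 1) := rfl
    rw [e, Nat.shiftRight_one]
    simp only [Int.negSucc_eq] at h ⊢
    omega

-- bit_length of a doubled positive number
lemma bitLength_double (low : Int) (h : 0 < low) :
    PySem.Int.bitLength (2*low) = PySem.Int.bitLength low + 1 := by
  have hf : PySem.Int.floordiv (2*low) 2 = low := by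
    rw [PySem.Int.floordiv_eq_ediv_of_pos (by norm_num)]
    omega
  rw [PySem.Int.bitLength_of_pos (show (0:Int) < 2*low by omega), hf]

-- A's loop with the recorded index shifted by an offset i
def AoffLoop (mask : Int) (cap : Int) (i : Int) (values : List Int) : List Int :=
  if h : mask ≠ 0 ∧ (values.length : Int) < cap then
    AoffLoop (PySem.Int.bxor mask (PySem.Int.band mask (-mask))) cap i
      (values ++ [2 * (i + (PySem.Int.bitLength (PySem.Int.band mask (-mask)) : Int) - 1)])
  else values
termination_by (cap - values.length).toNat
decreasing_by simp only [List.length_append, List.length_cons, List.length_nil]; omega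

-- doubling the mask shifts every recorded index by one
lemma aoff_double (cap : Int) : ∀ (n : Nat) (m i : Int) (vs : List Int),
    (cap - vs.length).toNat ≤ n → AoffLoop (2*m) cap i vs = AoffLoop m cap (i+1) vs := by
  intro n
  induction n with
  | zero =>
    intro m i vs h
    conv_lhs => rw [AoffLoop]
    conv_rhs => rw [AoffLoop]
    rw [dif_neg (by omega), dif_neg (by omega)]
  | succ n ih =>
    intro m i vs h
    by_cases hm : m = 0
    · subst hm
      conv_lhs => rw [AoffLoop]
      conv_rhs => rw [AoffLoop]
      rw [dif_neg (by omega), dif_neg (by omega)]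
    by_cases hl : (vs.length : Int) < cap
    · conv_lhs => rw [AoffLoop]
      conv_rhs => rw [AoffLoop]
      rw [dif_pos ⟨by omega, hl⟩, dif_pos ⟨hm, hl⟩]
      rw [band_neg_self_double m hm, bitLength_double _ (band_neg_self_pos m hm),
          bxor_double]
      have harg : (2:Int) * (i + ((PySem.Int.bitLength (PySem.Int.band m (-m)) + 1 : Nat) : Int) - 1)
          = 2 * (i + 1 + ((PySem.Int.bitLength (PySem.Int.band m (-m)) : Nat) : Int) - 1) := by
        push_cast
        ring
      rw [harg]
      exact ih _ _ _ (by simp only [List.length_append, List.length_cons, List.length_nil]; omega)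
    · conv_lhs => rw [AoffLoop]
      conv_rhs => rw [AoffLoop]
      rw [dif_neg (by omega), dif_neg (by omega)]

lemma a_eq_aoff (cap : Int) : ∀ (n : Nat) (m : Int) (vs : List Int),
    (cap - vs.length).toNat ≤ n → sampleLoopA m cap vs = AoffLoop m cap 0 vs := by
  intro n
  induction n with
  | zero =>
    intro m vs h
    conv_lhs => rw [sampleLoopA]
    conv_rhs => rw [AoffLoop]
    rw [dif_neg (by omega), dif_neg (by omega)]
  | succ n ih =>
    intro m vs h
    by_cases hg : m ≠ 0 ∧ (vs.length : Int) < cap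
    · conv_lhs => rw [sampleLoopA]
      conv_rhs => rw [AoffLoop]
      rw [dif_pos hg, dif_pos hg]
      dsimp only
      have harg : (2:Int) * ((PySem.Int.bitLength (PySem.Int.band m (-m)) : Int) - 1)
          = 2 * (0 + (PySem.Int.bitLength (PySem.Int.band m (-m)) : Int) - 1) := by ring
      rw [harg]
      exact ih _ _ (by simp only [List.length_append, List.length_cons, List.length_nil]; omega)
    · conv_lhs => rw [sampleLoopA]
      conv_rhs => rw [AoffLoop]
      rw [dif_neg hg, dif_neg hg]

lemma b_eq_aoff (cap : Int) : ∀ (n : Nat) (m i : Int) (vs : List Int),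
    m.natAbs + (cap - vs.length).toNat ≤ n → sampleLoopB m cap i vs = AoffLoop m cap i vs := by
  intro n
  induction n with
  | zero =>
    intro m i vs h
    have hm : m = 0 := by omega
    subst hm
    conv_lhs => rw [sampleLoopB]
    conv_rhs => rw [AoffLoop]
    rw [dif_neg (by omega), dif_neg (by omega)]
  | succ n ih =>
    intro m i vs h
    by_cases hg : m ≠ 0 ∧ (vs.length : Int) < cap
    · obtain ⟨hm, hl⟩ := hg
      conv_lhs => rw [sampleLoopB]
      rw [dif_pos ⟨hm, hl⟩]
      dsimp only
      by_cases hodd : m % 2 = 1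
      · -- odd step: B appends 2*i; A's lowest set bit is 1, so A records 2*i and clears it
        have hb1 : PySem.Int.band m 1 ≠ 0 := by rw [band_one_eq_emod]; omega
        rw [if_pos hb1]
        conv_rhs => rw [AoffLoop]
        rw [dif_pos ⟨hm, hl⟩]
        rw [band_neg_self_odd m hodd, bxor_one_odd m hodd]
        have hL : PySem.Int.bitLength 1 = 1 := by decide
        rw [hL]
        have harg : (2:Int) * (i + ((1:Nat) : Int) - 1) = 2 * i := by
          push_cast
          ring
        rw [harg]
        rw [show m - 1 = 2 * (m >>> (1:Nat)) from (two_mul_shiftRight_odd m hodd).symm]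
        rw [aoff_double cap ((cap - ((vs ++ [2*i] : List Int).length : Int)).toNat) _ _ _ (le_refl _)]
        apply ih
        have hle := natAbs_shiftRight_le m
        simp only [List.length_append, List.length_cons, List.length_nil]
        omega
      · -- even step: B appends nothing; halving the mask shifts A's indices by one
        have heven : m % 2 = 0 := by
          have := Int.emod_two_eq m
          omega
        have hb0 : ¬ (PySem.Int.band m 1 ≠ 0) := by rw [band_one_eq_emod]; omega
        rw [if_neg hb0]
        conv_rhs => rw [show m = 2 * (m >>> (1:Nat)) from (two_mul_shiftRight_even m heven).symm]
        rw [aoff_double cap ((cap - (vs.length : Int)).toNat) _ _ _ (le_refl _)]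
        apply ih
        have := natAbs_shiftRight_lt m hm heven
        omega
    · conv_lhs => rw [sampleLoopB]
      conv_rhs => rw [AoffLoop]
      rw [dif_neg hg, dif_neg hg]

-- ===== VERDICT (by name: the statement is the Claim_ definition above) =====
theorem sample_witnesses_spec : Claim_equal_sample_witnesses := by
  intro mask cap _
  unfold Spec_sample_witnesses sample_witnesses sample_witnesses_alt
  rw [a_eq_aoff cap ((cap - (([] : List Int).length : Int)).toNat) mask [] (le_refl _),
      b_eq_aoff cap (mask.natAbs + (cap - (([] : List Int).length : Int)).toNat) mask 0 [] (le_refl _)]
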